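-- pv_equiv track=rewrite | github.com/Firmfox/Proxify | app/main.py | organize_configs
-- ===== SOURCE A (Python) =====
-- def organize_configs(configs):
--     protocol_map = {
--         'vmess': [],
--         'vless': [],
--         'trojan': [],
--         'shadowsocks': [],
--         'wireguard': [],
--         'warp': [],
--         'reality': [],
--         'other': []
--     }
--
--     for config in configs:
--         if not config.strip():
--             continue
--
--         config_lower = config.lower()
--         if 'vmess://' in config_lower:
--             protocol_map['vmess'].append(config)
--         elif 'vless://' in config_lower:
--             protocol_map['vless'].append(config)
--         elif 'trojan://' in config_lower:
--             protocol_map['trojan'].append(config)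
--         elif 'ss://' in config_lower or 'shadowsocks://' in config_lower:
--             protocol_map['shadowsocks'].append(config)
--         elif 'wireguard' in config_lower or 'wg://' in config_lower:
--             protocol_map['wireguard'].append(config)
--         elif 'warp' in config_lower:
--             protocol_map['warp'].append(config)
--         elif 'reality' in config_lower:
--             protocol_map['reality'].append(config)
--         else:
--             protocol_map['other'].append(config)
--
--     return protocol_map
-- ===== SOURCE B (Python) =====
-- MATCHERS = [
--     ("vmess", lambda s: "vmess://" in s),
--     ("vless", lambda s: "vless://" in s),
--     ("trojan", lambda s: "trojan://" in s),
--     ("shadowsocks", lambda s: "ss://" in s or "shadowsocks://" in s),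
--     ("wireguard", lambda s: "wireguard" in s or "wg://" in s),
--     ("warp", lambda s: "warp" in s),
--     ("reality", lambda s: "reality" in s),
-- ]
--
--
-- def organize_configs(configs):
--     # staged partition: peel off each bucket from the remaining pool in
--     # priority order; what survives every stage is 'other'
--     remaining = [(c, c.lower()) for c in configs if c.strip()]
--     result = {}
--     for name, match in MATCHERS:
--         result[name] = [c for c, low in remaining if match(low)]
--         remaining = [p for p in remaining if not match(p[1])]
--     result["other"] = [c for c, _ in remaining]
--     return result
-- ===== Notes on version B (the rewrite author's own statement) =====
-- stated objective: alternative
-- what changed: Replaced A's single pass with a per-config if-elif cascade by a staged partition: each bucket is peeled off the remaining pool in priority order by a whole-list filter pass, and whatever survives all stages becomes 'other'; lowercased strings are computed once and carried as pairs.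
import Mathlib
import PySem

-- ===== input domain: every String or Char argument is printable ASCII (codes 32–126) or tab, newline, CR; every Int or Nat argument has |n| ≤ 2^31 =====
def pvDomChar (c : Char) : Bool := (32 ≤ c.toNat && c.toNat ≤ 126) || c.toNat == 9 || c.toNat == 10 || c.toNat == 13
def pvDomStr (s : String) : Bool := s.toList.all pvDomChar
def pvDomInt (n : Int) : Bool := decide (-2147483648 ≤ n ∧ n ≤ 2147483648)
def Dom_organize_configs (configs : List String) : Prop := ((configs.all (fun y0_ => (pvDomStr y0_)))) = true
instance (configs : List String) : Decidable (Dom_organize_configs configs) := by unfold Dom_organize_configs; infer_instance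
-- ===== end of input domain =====

-- B replaces A's per-config if-elif cascade by staged partition passes: each bucket is peeled off the remaining pool by a whole-list filter, in priority order (alternative, same cost).


-- ===== PORT A =====
def organize_configs (configs : List String) : List (String × List String) :=
  let init : PySem.Dict String (List String) :=
    PySem.Dict.ofList [("vmess", []), ("vless", []), ("trojan", []), ("shadowsocks", []),
                       ("wireguard", []), ("warp", []), ("reality", []), ("other", [])]
  (configs.foldl (fun d config =>
    if PySem.Str.strip config = "" then d
    else
      let cl := PySem.Str.lower config
      if PySem.Str.isIn "vmess://" cl then d.modify "vmess" [] (· ++ [config])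
      else if PySem.Str.isIn "vless://" cl then d.modify "vless" [] (· ++ [config])
      else if PySem.Str.isIn "trojan://" cl then d.modify "trojan" [] (· ++ [config])
      else if PySem.Str.isIn "ss://" cl || PySem.Str.isIn "shadowsocks://" cl then
        d.modify "shadowsocks" [] (· ++ [config])
      else if PySem.Str.isIn "wireguard" cl || PySem.Str.isIn "wg://" cl then
        d.modify "wireguard" [] (· ++ [config])
      else if PySem.Str.isIn "warp" cl then d.modify "warp" [] (· ++ [config])
      else if PySem.Str.isIn "reality" cl then d.modify "reality" [] (· ++ [config])
      else d.modify "other" [] (· ++ [config])) init).items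

-- ===== PORT B =====
-- the module-level MATCHERS table of Source B: (bucket name, predicate on the lowercased config)
def ocMatchers : List (String × (String → Bool)) :=
  [("vmess", fun s => PySem.Str.isIn "vmess://" s),
   ("vless", fun s => PySem.Str.isIn "vless://" s),
   ("trojan", fun s => PySem.Str.isIn "trojan://" s),
   ("shadowsocks", fun s => PySem.Str.isIn "ss://" s || PySem.Str.isIn "shadowsocks://" s),
   ("wireguard", fun s => PySem.Str.isIn "wireguard" s || PySem.Str.isIn "wg://" s),
   ("warp", fun s => PySem.Str.isIn "warp" s),
   ("reality", fun s => PySem.Str.isIn "reality" s)]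

def organize_configs_alt (configs : List String) : List (String × List String) :=
  let remaining : List (String × String) :=
    (configs.filter (fun c => !(PySem.Str.strip c == ""))).map (fun c => (c, PySem.Str.lower c))
  let st := ocMatchers.foldl
    (fun (st : PySem.Dict String (List String) × List (String × String)) m =>
      (st.1.insert m.1 ((st.2.filter (fun p => m.2 p.2)).map Prod.fst),
       st.2.filter (fun p => !(m.2 p.2))))
    (PySem.Dict.empty, remaining)
  (st.1.insert "other" (st.2.map Prod.fst)).items

-- ===== PRECONDITION & SPEC =====
def Spec_organize_configs (configs : List String) (out : List (String × List String)) : Prop := out = organize_configs_alt configs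
instance (configs : List String) (out : List (String × List String)) : Decidable (Spec_organize_configs configs out) := by unfold Spec_organize_configs; infer_instance

-- ===== CLAIM (what is proved, stated in full; the proofs are below) =====
def Claim_equal_organize_configs : Prop := ∀ (configs : List String), Dom_organize_configs configs → Spec_organize_configs configs (organize_configs configs)

-- ===== LEMMAS AND PROOFS =====

-- proof helpers: classification index of a config under A's cascade, bucket selection, dict shape
def ocCls (c : String) : Nat :=
  let l := PySem.Str.lower c
  if PySem.Str.isIn "vmess://" l then 0
  else if PySem.Str.isIn "vless://" l then 1
  else if PySem.Str.isIn "trojan://" l then 2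
  else if PySem.Str.isIn "ss://" l || PySem.Str.isIn "shadowsocks://" l then 3
  else if PySem.Str.isIn "wireguard" l || PySem.Str.isIn "wg://" l then 4
  else if PySem.Str.isIn "warp" l then 5
  else if PySem.Str.isIn "reality" l then 6
  else 7

def ocSel (i : Nat) (configs : List String) : List String :=
  (configs.filter (fun c => !(PySem.Str.strip c == ""))).filter (fun c => ocCls c == i)

def ocMkD (v0 v1 v2 v3 v4 v5 v6 v7 : List String) : PySem.Dict String (List String) :=
  PySem.Dict.mk [("vmess", v0), ("vless", v1), ("trojan", v2), ("shadowsocks", v3),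
                 ("wireguard", v4), ("warp", v5), ("reality", v6), ("other", v7)]

-- A's loop body as a named function (identical to the lambda in the port; proof helper)
def ocStepA (d : PySem.Dict String (List String)) (config : String) : PySem.Dict String (List String) :=
  if PySem.Str.strip config = "" then d
  else
    let cl := PySem.Str.lower config
    if PySem.Str.isIn "vmess://" cl then d.modify "vmess" [] (· ++ [config])
    else if PySem.Str.isIn "vless://" cl then d.modify "vless" [] (· ++ [config])
    else if PySem.Str.isIn "trojan://" cl then d.modify "trojan" [] (· ++ [config])
    else if PySem.Str.isIn "ss://" cl || PySem.Str.isIn "shadowsocks://" cl then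
      d.modify "shadowsocks" [] (· ++ [config])
    else if PySem.Str.isIn "wireguard" cl || PySem.Str.isIn "wg://" cl then
      d.modify "wireguard" [] (· ++ [config])
    else if PySem.Str.isIn "warp" cl then d.modify "warp" [] (· ++ [config])
    else if PySem.Str.isIn "reality" cl then d.modify "reality" [] (· ++ [config])
    else d.modify "other" [] (· ++ [config])

theorem ocFoldA (l : List String) (v0 v1 v2 v3 v4 v5 v6 v7 : List String) :
    l.foldl ocStepA (ocMkD v0 v1 v2 v3 v4 v5 v6 v7) =
      ocMkD (v0 ++ ocSel 0 l) (v1 ++ ocSel 1 l) (v2 ++ ocSel 2 l) (v3 ++ ocSel 3 l)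
            (v4 ++ ocSel 4 l) (v5 ++ ocSel 5 l) (v6 ++ ocSel 6 l) (v7 ++ ocSel 7 l) := by
  induction l generalizing v0 v1 v2 v3 v4 v5 v6 v7 with
  | nil => simp [ocSel]
  | cons c cs ih =>
    rw [List.foldl_cons]
    by_cases h : PySem.Str.strip c = ""
    · have hstep : ocStepA (ocMkD v0 v1 v2 v3 v4 v5 v6 v7) c = ocMkD v0 v1 v2 v3 v4 v5 v6 v7 := by
        simp [ocStepA, h]
      rw [hstep, ih]
      simp [ocSel, h]
    by_cases h0 : PySem.Chars.isIn ['v', 'm', 'e', 's', 's', ':', '/', '/'] (PySem.Chars.lower c.toList) = true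
    · have hstep : ocStepA (ocMkD v0 v1 v2 v3 v4 v5 v6 v7) c = ocMkD (v0 ++ [c]) v1 v2 v3 v4 v5 v6 v7 := by
        simp [ocStepA, ocMkD, h, h0, PySem.Dict.modify, PySem.Dict.insert, PySem.Dict.get?, PySem.Dict.getD, PySem.Dict.contains]
      rw [hstep, ih]
      simp [ocSel, ocCls, h, h0]
    · simp only [Bool.not_eq_true] at h0
      by_cases h1 : PySem.Chars.isIn ['v', 'l', 'e', 's', 's', ':', '/', '/'] (PySem.Chars.lower c.toList) = true
      · have hstep : ocStepA (ocMkD v0 v1 v2 v3 v4 v5 v6 v7) c = ocMkD v0 (v1 ++ [c]) v2 v3 v4 v5 v6 v7 := by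
          simp [ocStepA, ocMkD, h, h0, h1, PySem.Dict.modify, PySem.Dict.insert, PySem.Dict.get?, PySem.Dict.getD, PySem.Dict.contains]
        rw [hstep, ih]
        simp [ocSel, ocCls, h, h0, h1]
      · simp only [Bool.not_eq_true] at h1
        by_cases h2 : PySem.Chars.isIn ['t', 'r', 'o', 'j', 'a', 'n', ':', '/', '/'] (PySem.Chars.lower c.toList) = true
        · have hstep : ocStepA (ocMkD v0 v1 v2 v3 v4 v5 v6 v7) c = ocMkD v0 v1 (v2 ++ [c]) v3 v4 v5 v6 v7 := by
            simp [ocStepA, ocMkD, h, h0, h1, h2, PySem.Dict.modify, PySem.Dict.insert, PySem.Dict.get?, PySem.Dict.getD, PySem.Dict.contains]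
          rw [hstep, ih]
          simp [ocSel, ocCls, h, h0, h1, h2]
        · simp only [Bool.not_eq_true] at h2
          by_cases h3a : PySem.Chars.isIn ['s', 's', ':', '/', '/'] (PySem.Chars.lower c.toList) = true
          · have hstep : ocStepA (ocMkD v0 v1 v2 v3 v4 v5 v6 v7) c = ocMkD v0 v1 v2 (v3 ++ [c]) v4 v5 v6 v7 := by
              simp [ocStepA, ocMkD, h, h0, h1, h2, h3a, PySem.Dict.modify, PySem.Dict.insert, PySem.Dict.get?, PySem.Dict.getD, PySem.Dict.contains]
            rw [hstep, ih]
            simp [ocSel, ocCls, h, h0, h1, h2, h3a]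
          · simp only [Bool.not_eq_true] at h3a
            by_cases h3b : PySem.Chars.isIn ['s', 'h', 'a', 'd', 'o', 'w', 's', 'o', 'c', 'k', 's', ':', '/', '/'] (PySem.Chars.lower c.toList) = true
            · have hstep : ocStepA (ocMkD v0 v1 v2 v3 v4 v5 v6 v7) c = ocMkD v0 v1 v2 (v3 ++ [c]) v4 v5 v6 v7 := by
                simp [ocStepA, ocMkD, h, h0, h1, h2, h3a, h3b, PySem.Dict.modify, PySem.Dict.insert, PySem.Dict.get?, PySem.Dict.getD, PySem.Dict.contains]
              rw [hstep, ih]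
              simp [ocSel, ocCls, h, h0, h1, h2, h3a, h3b]
            · simp only [Bool.not_eq_true] at h3b
              by_cases h4a : PySem.Chars.isIn ['w', 'i', 'r', 'e', 'g', 'u', 'a', 'r', 'd'] (PySem.Chars.lower c.toList) = true
              · have hstep : ocStepA (ocMkD v0 v1 v2 v3 v4 v5 v6 v7) c = ocMkD v0 v1 v2 v3 (v4 ++ [c]) v5 v6 v7 := by
                  simp [ocStepA, ocMkD, h, h0, h1, h2, h3a, h3b, h4a, PySem.Dict.modify, PySem.Dict.insert, PySem.Dict.get?, PySem.Dict.getD, PySem.Dict.contains]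
                rw [hstep, ih]
                simp [ocSel, ocCls, h, h0, h1, h2, h3a, h3b, h4a]
              · simp only [Bool.not_eq_true] at h4a
                by_cases h4b : PySem.Chars.isIn ['w', 'g', ':', '/', '/'] (PySem.Chars.lower c.toList) = true
                · have hstep : ocStepA (ocMkD v0 v1 v2 v3 v4 v5 v6 v7) c = ocMkD v0 v1 v2 v3 (v4 ++ [c]) v5 v6 v7 := by
                    simp [ocStepA, ocMkD, h, h0, h1, h2, h3a, h3b, h4a, h4b, PySem.Dict.modify, PySem.Dict.insert, PySem.Dict.get?, PySem.Dict.getD, PySem.Dict.contains]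
                  rw [hstep, ih]
                  simp [ocSel, ocCls, h, h0, h1, h2, h3a, h3b, h4a, h4b]
                · simp only [Bool.not_eq_true] at h4b
                  by_cases h5 : PySem.Chars.isIn ['w', 'a', 'r', 'p'] (PySem.Chars.lower c.toList) = true
                  · have hstep : ocStepA (ocMkD v0 v1 v2 v3 v4 v5 v6 v7) c = ocMkD v0 v1 v2 v3 v4 (v5 ++ [c]) v6 v7 := by
                      simp [ocStepA, ocMkD, h, h0, h1, h2, h3a, h3b, h4a, h4b, h5, PySem.Dict.modify, PySem.Dict.insert, PySem.Dict.get?, PySem.Dict.getD, PySem.Dict.contains]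
                    rw [hstep, ih]
                    simp [ocSel, ocCls, h, h0, h1, h2, h3a, h3b, h4a, h4b, h5]
                  · simp only [Bool.not_eq_true] at h5
                    by_cases h6 : PySem.Chars.isIn ['r', 'e', 'a', 'l', 'i', 't', 'y'] (PySem.Chars.lower c.toList) = true
                    · have hstep : ocStepA (ocMkD v0 v1 v2 v3 v4 v5 v6 v7) c = ocMkD v0 v1 v2 v3 v4 v5 (v6 ++ [c]) v7 := by
                        simp [ocStepA, ocMkD, h, h0, h1, h2, h3a, h3b, h4a, h4b, h5, h6, PySem.Dict.modify, PySem.Dict.insert, PySem.Dict.get?, PySem.Dict.getD, PySem.Dict.contains]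
                      rw [hstep, ih]
                      simp [ocSel, ocCls, h, h0, h1, h2, h3a, h3b, h4a, h4b, h5, h6]
                    · simp only [Bool.not_eq_true] at h6
                      have hstep : ocStepA (ocMkD v0 v1 v2 v3 v4 v5 v6 v7) c = ocMkD v0 v1 v2 v3 v4 v5 v6 (v7 ++ [c]) := by
                        simp [ocStepA, ocMkD, h, h0, h1, h2, h3a, h3b, h4a, h4b, h5, h6, PySem.Dict.modify, PySem.Dict.insert, PySem.Dict.get?, PySem.Dict.getD, PySem.Dict.contains]
                      rw [hstep, ih]
                      simp [ocSel, ocCls, h, h0, h1, h2, h3a, h3b, h4a, h4b, h5, h6]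

theorem organize_configs_eq_sel (configs : List String) :
    organize_configs configs =
      [("vmess", ocSel 0 configs), ("vless", ocSel 1 configs), ("trojan", ocSel 2 configs),
       ("shadowsocks", ocSel 3 configs), ("wireguard", ocSel 4 configs),
       ("warp", ocSel 5 configs), ("reality", ocSel 6 configs), ("other", ocSel 7 configs)] := by
  have hinit : PySem.Dict.ofList [("vmess", ([] : List String)), ("vless", []), ("trojan", []), ("shadowsocks", []),
      ("wireguard", []), ("warp", []), ("reality", []), ("other", [])] = ocMkD [] [] [] [] [] [] [] [] := by decide
  show (configs.foldl ocStepA _).items = _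
  rw [hinit, ocFoldA]
  simp [ocMkD]


theorem organize_configs_alt_eq_sel (configs : List String) :
    organize_configs_alt configs =
      [("vmess", ocSel 0 configs), ("vless", ocSel 1 configs), ("trojan", ocSel 2 configs),
       ("shadowsocks", ocSel 3 configs), ("wireguard", ocSel 4 configs),
       ("warp", ocSel 5 configs), ("reality", ocSel 6 configs), ("other", ocSel 7 configs)] := by
  unfold organize_configs_alt ocMatchers
  simp only [List.foldl_cons, List.foldl_nil]
  simp [PySem.Dict.insert, PySem.Dict.empty, PySem.Dict.contains,
        List.filter_filter, List.filter_map, List.map_map, Function.comp]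
  refine ⟨?_, ?_, ?_, ?_, ?_, ?_, ?_, ?_⟩ <;>
  · simp [ocSel, List.filter_filter, Function.comp_def]
    refine List.filter_congr fun a _ => ?_
    simp only [ocCls]
    split_ifs <;> (try simp_all) <;> (intros; simp_all)

-- ===== VERDICT (by name: the statement is the Claim_ definition above) =====
theorem organize_configs_spec : Claim_equal_organize_configs := by
  intro configs _
  show organize_configs configs = organize_configs_alt configs
  rw [organize_configs_eq_sel, organize_configs_alt_eq_sel]
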